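-- pv_equiv track=rewrite | github.com/OUIsolutions/CTolkitBuild | CToolKit/readme_converter.py | get_code_reference
-- ===== SOURCE A (Python) =====
-- def get_code_reference(line:str)->str or None:
--     test = ''
--     TARGET  = '<!--codeof:'
--     inclusion = ''
--     found_start = False
--     for letter in line:
--
--
--         if found_start == False:
--
--             if letter == ' ':
--                 continue
--
--             if not TARGET.startswith(test):
--                 return None
--
--             test+=letter
--
--             if test == TARGET:
--                 found_start = True
--                 continue
--
--         if found_start:
--
--             if letter == ' ' or letter == '-':
--                 return inclusion
--
--             inclusion+=letter
--
--     return None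
-- ===== SOURCE B (Python) =====
-- def get_code_reference(line: str):
--     TARGET = '<!--codeof:'
--     # phase 1: consume the target characters, skipping spaces interleaved with them
--     i = 0
--     for t in TARGET:
--         while i < len(line) and line[i] == ' ':
--             i += 1
--         if i >= len(line) or line[i] != t:
--             return None
--         i += 1
--     # phase 2: the token is everything up to the first ' ' or '-'; no terminator -> None
--     rest = line[i:]
--     j1 = rest.find(' ')
--     j2 = rest.find('-')
--     if j1 == -1 and j2 == -1:
--         return None
--     if j1 == -1:
--         j = j2
--     elif j2 == -1:
--         j = j1
--     else:
--         j = min(j1, j2)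
--     return rest[:j]
-- ===== Notes on version B (the rewrite author's own statement) =====
-- stated objective: alternative
-- what changed: Replaces A's single-pass state machine (growing test buffer re-checked with startswith each step, found_start flag, accumulated inclusion string) by a two-phase index scan: consume the target characters with interleaved space-skipping via an index pointer, then locate the token's end with str.find for each terminator and slice it out.
import Mathlib
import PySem

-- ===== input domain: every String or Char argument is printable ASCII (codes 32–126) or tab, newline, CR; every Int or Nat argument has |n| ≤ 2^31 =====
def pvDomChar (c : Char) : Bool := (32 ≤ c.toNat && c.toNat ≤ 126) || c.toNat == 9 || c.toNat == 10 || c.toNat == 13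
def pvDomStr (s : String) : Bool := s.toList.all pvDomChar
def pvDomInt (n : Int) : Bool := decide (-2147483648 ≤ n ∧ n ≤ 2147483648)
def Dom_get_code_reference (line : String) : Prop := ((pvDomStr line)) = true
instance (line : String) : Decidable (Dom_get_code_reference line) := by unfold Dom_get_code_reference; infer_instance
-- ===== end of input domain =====

-- B replaces A's one-pass state machine by a two-phase index scan (alternative decomposition; same behaviour).

-- the constant TARGET = '<!--codeof:' of both Pythons, as a char list
def pvTarget : List Char := ['<', '!', '-', '-', 'c', 'o', 'd', 'e', 'o', 'f', ':']

-- ===== PORT A =====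
-- A's loop over the line with state (test, inclusion, found_start); early returns become results.
def goA : List Char → List Char → List Char → Bool → Option String
  | [], _, _, _ => none
  | c :: r, test, incl, found =>
    if found then
      if c = ' ' ∨ c = '-' then some (String.mk incl)
      else goA r test (incl ++ [c]) found
    else
      if c = ' ' then goA r test incl false
      else if test.isPrefixOf pvTarget = false then none
      else
        let test' := test ++ [c]
        if test' = pvTarget then goA r test' incl true
        else goA r test' incl false

def get_code_reference (line : String) : Option String :=
  goA line.toList [] [] false

-- ===== PORT B =====
-- Source B phase 1: the inner 'while line[i] == " "' loop
def skipSpacesB : List Char → List Char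
  | [] => []
  | c :: r => if c = ' ' then skipSpacesB r else c :: r

-- Source B phase 1: 'for t in TARGET: skip spaces; mismatch or end -> None'
def consumeB : List Char → List Char → Option (List Char)
  | [], l => some l
  | t :: ts, l =>
    match skipSpacesB l with
    | [] => none
    | c :: r => if c = t then consumeB ts r else none

-- Source B phase 2: str.find ported as findIdx? (none plays Python's -1, matched branch for branch)
def get_code_reference_alt (line : String) : Option String :=
  match consumeB pvTarget line.toList with
  | none => none
  | some rest =>
    match rest.findIdx? (· = ' '), rest.findIdx? (· = '-') with
    | none, none => none
    | some j1, none => some (String.mk (rest.take j1))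
    | none, some j2 => some (String.mk (rest.take j2))
    | some j1, some j2 => some (String.mk (rest.take (min j1 j2)))

-- ===== PRECONDITION & SPEC =====
def Spec_get_code_reference (line : String) (out : Option String) : Prop := out = get_code_reference_alt line
instance (line : String) (out : Option String) : Decidable (Spec_get_code_reference line out) := by unfold Spec_get_code_reference; infer_instance

-- ===== CLAIM (what is proved, stated in full; the proofs are below) =====
def Claim_equal_get_code_reference : Prop := ∀ (line : String), Dom_get_code_reference line → Spec_get_code_reference line (get_code_reference line)

-- ===== LEMMAS AND PROOFS =====

-- what A computes once found_start is true, phrased with a single findIdx?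
def tailSpec (r incl : List Char) : Option String :=
  match r.findIdx? (fun c => c = ' ' || c = '-') with
  | none => none
  | some j => some (String.mk (incl ++ r.take j))

theorem goA_found (r : List Char) : ∀ incl, goA r pvTarget incl true = tailSpec r incl := by
  induction r with
  | nil => intro incl; simp [goA, tailSpec]
  | cons c r ih =>
    intro incl
    by_cases hc : c = ' ' ∨ c = '-'
    · have hb : (decide (c = ' ') || decide (c = '-')) = true := by
        rcases hc with h | h <;> simp [h]
      simp [goA, tailSpec, hc, List.findIdx?_cons, hb]
    · have hb : (decide (c = ' ') || decide (c = '-')) = false := by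
        push_neg at hc; simp [hc.1, hc.2]
      simp only [goA, if_neg hc, if_pos rfl, ih]
      simp [tailSpec, List.findIdx?_cons, hb]
      cases h : r.findIdx? (fun c => c = ' ' || c = '-') with
      | none => simp
      | some j => simp [List.take_succ_cons]

-- merging the two finds of Source B into one find over the disjunction
theorem findIdx?_or (l : List Char) :
    (match l.findIdx? (· = ' '), l.findIdx? (· = '-') with
      | none, none => (none : Option Nat)
      | some j1, none => some j1
      | none, some j2 => some j2
      | some j1, some j2 => some (min j1 j2))
      = l.findIdx? (fun c => c = ' ' || c = '-') := by
  induction l with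
  | nil => simp
  | cons c l ih =>
    by_cases h1 : c = ' '
    · simp [List.findIdx?_cons, h1]
      cases h : l.findIdx? (· = '-') <;> simp
    · by_cases h2 : c = '-'
      · simp [List.findIdx?_cons, h1, h2]
        cases h : l.findIdx? (· = ' ') <;> simp
      · simp only [List.findIdx?_cons, decide_eq_true_eq, if_neg h1, if_neg h2,
          show (decide (c = ' ') || decide (c = '-')) = false by simp [h1, h2], Bool.false_eq_true,
          if_false]
        rw [← ih]
        cases hA : l.findIdx? (· = ' ') <;> cases hB : l.findIdx? (· = '-') <;>
          simp [Nat.succ_min_succ]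

theorem alt_eq (line : String) :
    get_code_reference_alt line =
      match consumeB pvTarget line.toList with
      | none => none
      | some rest => tailSpec rest [] := by
  unfold get_code_reference_alt
  cases h : consumeB pvTarget line.toList with
  | none => rfl
  | some rest =>
    simp only [tailSpec, ← findIdx?_or]
    cases h1 : rest.findIdx? (· = ' ') <;> cases h2 : rest.findIdx? (· = '-') <;> simp

-- once test is not a prefix of TARGET, A skips spaces and then returns None (or hits the end)
theorem goA_bad (l : List Char) : ∀ test incl, test.isPrefixOf pvTarget = false →
    goA l test incl false = none := by
  induction l with
  | nil => intro _ _ _; rfl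
  | cons c r ih =>
    intro test incl h
    by_cases hc : c = ' '
    · simp [goA, hc, ih _ _ h]
    · simp [goA, hc, h]

-- consumeB ignores a leading space while target characters remain
theorem consumeB_space (t : Char) (ts r : List Char) :
    consumeB (t :: ts) (' ' :: r) = consumeB (t :: ts) r := by
  simp [consumeB, skipSpacesB]

-- main invariant: while matching the target, A with test = pre agrees with B consuming suf
theorem goA_main (l : List Char) : ∀ pre suf, pre ++ suf = pvTarget → suf ≠ [] →
    goA l pre [] false =
      match consumeB suf l with
      | none => none
      | some rest => tailSpec rest [] := by
  induction l with
  | nil =>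
    intro pre suf _ hne
    cases suf with
    | nil => exact absurd rfl hne
    | cons t ts => simp [goA, consumeB, skipSpacesB]
  | cons c r ih =>
    intro pre suf heq hne
    cases suf with
    | nil => exact absurd rfl hne
    | cons t ts =>
      by_cases hc : c = ' '
      · subst hc
        simp only [goA, if_pos rfl, consumeB_space]
        exact ih pre (t :: ts) heq hne
      · have hpre : pre.isPrefixOf pvTarget = true := by
          rw [List.isPrefixOf_iff_prefix]
          exact ⟨t :: ts, heq⟩
        by_cases hct : c = t
        · subst hct
          cases ts with
          | nil =>
            have hfull : pre ++ [c] = pvTarget := heq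
            simp only [goA, if_neg hc, hpre, Bool.true_eq_false, if_false, if_pos hfull, hfull]
            simp [consumeB, skipSpacesB, hc, goA_found]
          | cons t2 ts2 =>
            have hne2 : pre ++ [c] ≠ pvTarget := by
              intro h
              have h1 := congrArg List.length h
              have h2 := congrArg List.length heq
              simp [List.length_append] at h1 h2
              omega
            simp only [goA, if_neg hc, hpre, Bool.true_eq_false, if_false, if_neg hne2]
            have : (pre ++ [c]) ++ (t2 :: ts2) = pvTarget := by
              rw [List.append_assoc]; exact heq
            rw [ih (pre ++ [c]) (t2 :: ts2) this (by simp)]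
            simp [consumeB, skipSpacesB, hc]
        · have hbad : (pre ++ [c]).isPrefixOf pvTarget = false := by
            rw [Bool.eq_false_iff]
            intro h
            rw [List.isPrefixOf_iff_prefix] at h
            rw [← heq] at h
            have h2 : [c] <+: t :: ts := (List.prefix_append_right_inj pre).mp h
            rw [List.cons_prefix_cons] at h2
            exact hct h2.1
          have hne2 : pre ++ [c] ≠ pvTarget := by
            intro h
            rw [h] at hbad
            exact absurd hbad (by decide)
          have hstep : goA (c :: r) pre [] false = goA r (pre ++ [c]) [] false := by
            simp only [goA]
            simp [hc, hpre, hne2]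
          rw [hstep, goA_bad _ _ _ hbad]
          simp [consumeB, skipSpacesB, hc, hct]

-- ===== VERDICT (by name: the statement is the Claim_ definition above) =====
theorem get_code_reference_spec : Claim_equal_get_code_reference := by
  intro line _
  unfold Spec_get_code_reference get_code_reference
  rw [alt_eq]
  exact goA_main line.toList [] pvTarget rfl (by simp [pvTarget])
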